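-- pv_equiv track=rewrite | github.com/oldnordic/kwecli | agents/design/ux_researcher.py | _analyze_research_needs
-- ===== SOURCE A (Python) =====
-- from typing import Dict, List, Any, Optional
-- from enum import Enum
--
-- class ResearchMethod(Enum):
--     """Types of UX research methods."""
--     USER_INTERVIEWS = "user_interviews"
--     USABILITY_TESTING = "usability_testing"
--     SURVEYS = "surveys"
--     ANALYTICS_ANALYSIS = "analytics_analysis"
--     A_B_TESTING = "a_b_testing"
--     HEURISTIC_EVALUATION = "heuristic_evaluation"
--     CARD_SORTING = "card_sorting"
--     EYE_TRACKING = "eye_tracking"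
--     HEATMAP_ANALYSIS = "heatmap_analysis"
--     JOURNEY_MAPPING = "journey_mapping"
--
-- def _analyze_research_needs(task: str) -> List[str]:
--     """Analyze task to determine appropriate research methods."""
--     task_lower = task.lower()
--     methods = []
--
--     if any(word in task_lower for word in ["interview", "qualitative"]):
--         methods.append(ResearchMethod.USER_INTERVIEWS.value)
--
--     if any(word in task_lower for word in ["test", "usability", "interface"]):
--         methods.append(ResearchMethod.USABILITY_TESTING.value)
--
--     if any(word in task_lower for word in ["survey", "questionnaire"]):
--         methods.append(ResearchMethod.SURVEYS.value)
--
--     if any(word in task_lower for word in ["analytics", "data", "metrics"]):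
--         methods.append(ResearchMethod.ANALYTICS_ANALYSIS.value)
--
--     if any(word in task_lower for word in ["a/b", "experiment", "variant"]):
--         methods.append(ResearchMethod.A_B_TESTING.value)
--
--     if any(word in task_lower for word in ["journey", "experience", "flow"]):
--         methods.append(ResearchMethod.JOURNEY_MAPPING.value)
--
--     if any(word in task_lower for word in ["persona", "profile", "user type"]):
--         methods.append("persona_creation")
--
--     return methods if methods else ["comprehensive_ux_analysis"]
-- ===== SOURCE B (Python) =====
-- from typing import List
--
-- # keyword -> method, flattened; ORDER gives the output order of methods
-- KEYWORD_METHOD = [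
--     ("interview", "user_interviews"), ("qualitative", "user_interviews"),
--     ("test", "usability_testing"), ("usability", "usability_testing"), ("interface", "usability_testing"),
--     ("survey", "surveys"), ("questionnaire", "surveys"),
--     ("analytics", "analytics_analysis"), ("data", "analytics_analysis"), ("metrics", "analytics_analysis"),
--     ("a/b", "a_b_testing"), ("experiment", "a_b_testing"), ("variant", "a_b_testing"),
--     ("journey", "journey_mapping"), ("experience", "journey_mapping"), ("flow", "journey_mapping"),
--     ("persona", "persona_creation"), ("profile", "persona_creation"), ("user type", "persona_creation"),
-- ]
--
-- ORDER = ["user_interviews", "usability_testing", "surveys", "analytics_analysis",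
--          "a_b_testing", "journey_mapping", "persona_creation"]
--
-- def _analyze_research_needs(task: str) -> List[str]:
--     """Single scan over the text: at each position, record the methods whose
--     keyword starts there; then emit the found methods in canonical order."""
--     t = task.lower()
--     found = set()
--     for i in range(len(t)):
--         for kw, method in KEYWORD_METHOD:
--             if t.startswith(kw, i):
--                 found.add(method)
--     result = [m for m in ORDER if m in found]
--     return result if result else ["comprehensive_ux_analysis"]
-- ===== Notes on version B (the rewrite author's own statement) =====
-- stated objective: alternative
-- what changed: Instead of A's per-method any-substring checks appended in an if-chain, B does one left-to-right scan of the lowered text, at each position recording in a set the methods whose keyword starts there (naive multi-pattern matching), then emits the found methods in the fixed canonical order with the same fallback.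
import Mathlib
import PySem

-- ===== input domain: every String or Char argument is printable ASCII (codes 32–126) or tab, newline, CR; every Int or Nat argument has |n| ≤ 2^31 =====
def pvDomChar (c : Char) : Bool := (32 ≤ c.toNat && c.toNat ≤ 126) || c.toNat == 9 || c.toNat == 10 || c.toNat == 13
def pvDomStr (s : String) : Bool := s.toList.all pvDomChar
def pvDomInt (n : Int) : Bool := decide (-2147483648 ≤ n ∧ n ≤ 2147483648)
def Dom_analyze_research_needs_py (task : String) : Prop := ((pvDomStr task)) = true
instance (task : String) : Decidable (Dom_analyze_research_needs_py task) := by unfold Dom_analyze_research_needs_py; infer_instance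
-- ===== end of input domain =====

-- B replaces A's per-method if/append substring checks by a single left-to-right scan of the
-- lowered text that records matched methods in a set, then emits them in canonical order
-- (objective: alternative — naive multi-pattern scan instead of per-method membership tests).


-- ===== PORT A =====
def analyze_research_needs_py (task : String) : List String :=
  let task_lower := PySem.Str.lower task
  let methods : List String := []
  let methods := if ["interview", "qualitative"].any (fun word => PySem.Str.isIn word task_lower) then methods ++ ["user_interviews"] else methods
  let methods := if ["test", "usability", "interface"].any (fun word => PySem.Str.isIn word task_lower) then methods ++ ["usability_testing"] else methods
  let methods := if ["survey", "questionnaire"].any (fun word => PySem.Str.isIn word task_lower) then methods ++ ["surveys"] else methods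
  let methods := if ["analytics", "data", "metrics"].any (fun word => PySem.Str.isIn word task_lower) then methods ++ ["analytics_analysis"] else methods
  let methods := if ["a/b", "experiment", "variant"].any (fun word => PySem.Str.isIn word task_lower) then methods ++ ["a_b_testing"] else methods
  let methods := if ["journey", "experience", "flow"].any (fun word => PySem.Str.isIn word task_lower) then methods ++ ["journey_mapping"] else methods
  let methods := if ["persona", "profile", "user type"].any (fun word => PySem.Str.isIn word task_lower) then methods ++ ["persona_creation"] else methods
  if methods ≠ [] then methods else ["comprehensive_ux_analysis"]

-- ===== PORT B =====
-- B-side tables, mirrored from Source B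
def pvKeywordMethod : List (String × String) :=
  [ ("interview", "user_interviews"), ("qualitative", "user_interviews"),
    ("test", "usability_testing"), ("usability", "usability_testing"), ("interface", "usability_testing"),
    ("survey", "surveys"), ("questionnaire", "surveys"),
    ("analytics", "analytics_analysis"), ("data", "analytics_analysis"), ("metrics", "analytics_analysis"),
    ("a/b", "a_b_testing"), ("experiment", "a_b_testing"), ("variant", "a_b_testing"),
    ("journey", "journey_mapping"), ("experience", "journey_mapping"), ("flow", "journey_mapping"),
    ("persona", "persona_creation"), ("profile", "persona_creation"), ("user type", "persona_creation") ]

def pvOrder : List String :=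
  ["user_interviews", "usability_testing", "surveys", "analytics_analysis",
   "a_b_testing", "journey_mapping", "persona_creation"]

-- t.startswith(kw, i) for 0 ≤ i is exactly Chars.startswith on the list dropped at i (hand port, exact there)
def analyze_research_needs_py_alt (task : String) : List String :=
  let t := PySem.Str.lower task
  let found : PySem.Set String :=
    (PySem.List.pyRange 0 (PySem.Str.len t) 1).foldl
      (fun found i => pvKeywordMethod.foldl
        (fun found p =>
          if PySem.Chars.startswith (t.toList.drop i.toNat) p.1.toList then PySem.Set.add found p.2 else found)
        found)
      PySem.Set.empty
  let result := pvOrder.filter (fun m => found.contains m)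
  if result = [] then ["comprehensive_ux_analysis"] else result

-- ===== PRECONDITION & SPEC =====
def Spec_analyze_research_needs_py (task : String) (out : List String) : Prop := out = analyze_research_needs_py_alt task
instance (task : String) (out : List String) : Decidable (Spec_analyze_research_needs_py task out) := by unfold Spec_analyze_research_needs_py; infer_instance

-- ===== CLAIM (what is proved, stated in full; the proofs are below) =====
def Claim_equal_analyze_research_needs_py : Prop := ∀ (task : String), Dom_analyze_research_needs_py task → Spec_analyze_research_needs_py task (analyze_research_needs_py task)

-- ===== LEMMAS AND PROOFS =====

-- membership through the inner fold over the keyword table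
theorem pv_mem_inner (l : List (String × String)) (q : String × String → Bool)
    (fd : PySem.Set String) (m : String) :
    (m ∈ l.foldl (fun fd p => if q p then PySem.Set.add fd p.2 else fd) fd) ↔
      m ∈ fd ∨ ∃ p ∈ l, q p = true ∧ p.2 = m := by
  induction l generalizing fd with
  | nil => simp
  | cons p rest ih =>
    simp only [List.foldl_cons]
    by_cases hq : q p = true
    · rw [hq, if_pos rfl, ih, PySem.Set.mem_add]
      constructor
      · rintro (( h | h ) | h)
        · exact Or.inl h
        · exact Or.inr ⟨p, by simp [hq, h]⟩
        · obtain ⟨r, hr, h1, h2⟩ := h; exact Or.inr ⟨r, by simp [hr, h1, h2]⟩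
      · rintro (h | ⟨r, hr, h1, h2⟩)
        · exact Or.inl (Or.inl h)
        · rcases List.mem_cons.mp hr with h | h
          · exact Or.inl (Or.inr (by rw [← h2, h]))
          · exact Or.inr ⟨r, h, h1, h2⟩
    · rw [if_neg hq, ih]
      constructor
      · rintro (h | ⟨r, hr, h1, h2⟩)
        · exact Or.inl h
        · exact Or.inr ⟨r, List.mem_cons_of_mem _ hr, h1, h2⟩
      · rintro (h | ⟨r, hr, h1, h2⟩)
        · exact Or.inl h
        · rcases List.mem_cons.mp hr with h | h
          · exact absurd (h ▸ h1) (by simpa using hq)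
          · exact Or.inr ⟨r, h, h1, h2⟩

-- membership through the outer fold over positions
theorem pv_mem_outer (is : List Int) (t : List Char) (fd : PySem.Set String) (m : String) :
    (m ∈ is.foldl (fun fd i => pvKeywordMethod.foldl
        (fun fd p => if PySem.Chars.startswith (t.drop i.toNat) p.1.toList then PySem.Set.add fd p.2 else fd)
        fd) fd) ↔
      m ∈ fd ∨ ∃ i ∈ is, ∃ p ∈ pvKeywordMethod,
        PySem.Chars.startswith (t.drop i.toNat) p.1.toList = true ∧ p.2 = m := by
  induction is generalizing fd with
  | nil => simp
  | cons i rest ih =>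
    simp only [List.foldl_cons]
    rw [ih, pv_mem_inner]
    constructor
    · rintro ((h | ⟨r, hr, h1, h2⟩) | ⟨j, hj, r, hr, h1, h2⟩)
      · exact Or.inl h
      · exact Or.inr ⟨i, List.mem_cons_self .., r, hr, h1, h2⟩
      · exact Or.inr ⟨j, List.mem_cons_of_mem _ hj, r, hr, h1, h2⟩
    · rintro (h | ⟨j, hj, r, hr, h1, h2⟩)
      · exact Or.inl (Or.inl h)
      · rcases List.mem_cons.mp hj with h | h
        · exact Or.inl (Or.inr ⟨r, hr, h ▸ h1, h2⟩)
        · exact Or.inr ⟨j, h, r, hr, h1, h2⟩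

-- a nonempty keyword starts at some scanned position iff it is a substring
theorem pv_scan_iff_isIn (t : List Char) (kw : List Char) (hkw : kw ≠ []) :
    (∃ i ∈ PySem.List.pyRange 0 (t.length : Int) 1,
        PySem.Chars.startswith (t.drop i.toNat) kw = true) ↔
      PySem.Chars.isIn kw t = true := by
  rw [← PySem.Chars.exists_prefix_drop_iff_isIn]
  constructor
  · rintro ⟨i, _, h⟩
    exact ⟨i.toNat, (PySem.Chars.startswith_iff _ _).mp h⟩
  · rintro ⟨j, h⟩
    by_cases hj : j < t.length
    · refine ⟨(j : Int), ?_, ?_⟩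
      · rw [PySem.List.mem_pyRange_one]; omega
      · simpa [PySem.Chars.startswith_iff] using h
    · exfalso
      rw [List.drop_eq_nil_of_le (by omega)] at h
      exact hkw (List.prefix_nil.mp h)

-- ===== VERDICT (by name: the statement is the Claim_ definition above) =====
theorem analyze_research_needs_py_spec : Claim_equal_analyze_research_needs_py := by
  intro task _
  unfold Spec_analyze_research_needs_py analyze_research_needs_py analyze_research_needs_py_alt
  dsimp only
  have hlen : PySem.Str.len (PySem.Str.lower task) = ((PySem.Str.lower task).toList.length : Int) := by
    simp [PySem.Str.len_eq]
  rw [hlen]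
  set t := (PySem.Str.lower task).toList with ht
  have hmem : ∀ m : String,
      (m ∈ (PySem.List.pyRange 0 (t.length : Int) 1).foldl
        (fun fd i => pvKeywordMethod.foldl
          (fun fd p => if PySem.Chars.startswith (t.drop i.toNat) p.1.toList then PySem.Set.add fd p.2 else fd)
          fd) PySem.Set.empty) ↔
      ∃ p ∈ pvKeywordMethod, PySem.Chars.isIn p.1.toList t = true ∧ p.2 = m := by
    intro m
    rw [pv_mem_outer]
    simp only [PySem.Set.empty, List.not_mem_nil, false_or]
    constructor
    · rintro ⟨i, hi, r, hr, h1, h2⟩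
      refine ⟨r, hr, ?_, h2⟩
      have hne : r.1.toList ≠ [] := by
        fin_cases hr <;> decide
      exact (pv_scan_iff_isIn t r.1.toList hne).mp ⟨i, hi, h1⟩
    · rintro ⟨r, hr, h1, h2⟩
      have hne : r.1.toList ≠ [] := by
        fin_cases hr <;> decide
      obtain ⟨i, hi, h⟩ := (pv_scan_iff_isIn t r.1.toList hne).mpr h1
      exact ⟨i, hi, r, hr, h, h2⟩
  have hc : ∀ m : String,
      ((PySem.List.pyRange 0 (t.length : Int) 1).foldl
        (fun fd i => pvKeywordMethod.foldl
          (fun fd p => if PySem.Chars.startswith (t.drop i.toNat) p.1.toList then PySem.Set.add fd p.2 else fd)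
          fd) PySem.Set.empty).contains m = true ↔
      ∃ p ∈ pvKeywordMethod, PySem.Chars.isIn p.1.toList t = true ∧ p.2 = m := by
    intro m
    rw [PySem.Set.contains_iff]
    exact hmem m
  have h1 : ∀ m : String, ∀ b : Bool,
      ((∃ p ∈ pvKeywordMethod, PySem.Chars.isIn p.1.toList t = true ∧ p.2 = m) ↔ b = true) →
      ((PySem.List.pyRange 0 (t.length : Int) 1).foldl
        (fun fd i => pvKeywordMethod.foldl
          (fun fd p => if PySem.Chars.startswith (t.drop i.toNat) p.1.toList then PySem.Set.add fd p.2 else fd)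
          fd) PySem.Set.empty).contains m = b := by
    intro m b hb
    rw [Bool.eq_iff_iff, hc]
    exact hb
  simp only [pvOrder, List.filter_cons, List.filter_nil]
  rw [
      h1 "user_interviews" (["interview", "qualitative"].any (fun word => PySem.Str.isIn word (PySem.Str.lower task))) (by simp [pvKeywordMethod, ht]),
      h1 "usability_testing" (["test", "usability", "interface"].any (fun word => PySem.Str.isIn word (PySem.Str.lower task))) (by simp [pvKeywordMethod, ht]),
      h1 "surveys" (["survey", "questionnaire"].any (fun word => PySem.Str.isIn word (PySem.Str.lower task))) (by simp [pvKeywordMethod, ht]),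
      h1 "analytics_analysis" (["analytics", "data", "metrics"].any (fun word => PySem.Str.isIn word (PySem.Str.lower task))) (by simp [pvKeywordMethod, ht]),
      h1 "a_b_testing" (["a/b", "experiment", "variant"].any (fun word => PySem.Str.isIn word (PySem.Str.lower task))) (by simp [pvKeywordMethod, ht]),
      h1 "journey_mapping" (["journey", "experience", "flow"].any (fun word => PySem.Str.isIn word (PySem.Str.lower task))) (by simp [pvKeywordMethod, ht]),
      h1 "persona_creation" (["persona", "profile", "user type"].any (fun word => PySem.Str.isIn word (PySem.Str.lower task))) (by simp [pvKeywordMethod, ht])]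
  generalize (["interview", "qualitative"].any (fun word => PySem.Str.isIn word (PySem.Str.lower task))) = b1
  generalize (["test", "usability", "interface"].any (fun word => PySem.Str.isIn word (PySem.Str.lower task))) = b2
  generalize (["survey", "questionnaire"].any (fun word => PySem.Str.isIn word (PySem.Str.lower task))) = b3
  generalize (["analytics", "data", "metrics"].any (fun word => PySem.Str.isIn word (PySem.Str.lower task))) = b4
  generalize (["a/b", "experiment", "variant"].any (fun word => PySem.Str.isIn word (PySem.Str.lower task))) = b5
  generalize (["journey", "experience", "flow"].any (fun word => PySem.Str.isIn word (PySem.Str.lower task))) = b6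
  generalize (["persona", "profile", "user type"].any (fun word => PySem.Str.isIn word (PySem.Str.lower task))) = b7
  cases b1 <;> cases b2 <;> cases b3 <;> cases b4 <;> cases b5 <;> cases b6 <;> cases b7 <;> rfl
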